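-- pv_equiv track=rewrite | github.com/hoshikawa2/oag_migration_ociapi | source/generate_swagger.py | create_swagger_parameters
-- ===== SOURCE A (Python) =====
-- def create_swagger_parameters(paths, template):
--     splited_paths = paths.split("/")
--     first_tag_parameters = False
--     for subpaths in splited_paths:
--         if "{" in subpaths:
--             subpath_to_print = subpaths.replace("{", "").replace("}", "")
--             if not first_tag_parameters:
--                 template.append('      parameters:')
--                 first_tag_parameters = True
--             template.append('        - name: ' + subpath_to_print)
--             template.append('          in: path')
--             template.append('          description: ')
--             template.append('          required: true')
--             template.append('          type: string')
--     return template
-- ===== SOURCE B (Python) =====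
-- def create_swagger_parameters(paths, template):
--     # Character-level automaton: one pass over the raw characters of `paths`
--     # (no split, no replace).  State = (collected names, current segment's
--     # chars with braces dropped, whether the segment contained '{').
--     # Mutates `template` in place like the original.
--     names = []
--     cur = []
--     seen = False
--     for ch in paths:
--         if ch == '/':
--             if seen:
--                 names.append(''.join(cur))
--             cur = []
--             seen = False
--         elif ch == '{':
--             seen = True
--         elif ch != '}':
--             cur.append(ch)
--     if seen:
--         names.append(''.join(cur))
--     if names:
--         template.append('      parameters:')
--         for name in names:
--             template.append('        - name: ' + name)
--             template.append('          in: path')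
--             template.append('          description: ')
--             template.append('          required: true')
--             template.append('          type: string')
--     return template
-- ===== Notes on version B (the rewrite author's own statement) =====
-- stated objective: alternative
-- what changed: Replaces A's split/contains/replace pipeline over segment strings with a single character-level automaton over the raw path: one pass maintaining (names, current segment chars with braces dropped, saw-'{' flag), then one emission phase.
import Mathlib
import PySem

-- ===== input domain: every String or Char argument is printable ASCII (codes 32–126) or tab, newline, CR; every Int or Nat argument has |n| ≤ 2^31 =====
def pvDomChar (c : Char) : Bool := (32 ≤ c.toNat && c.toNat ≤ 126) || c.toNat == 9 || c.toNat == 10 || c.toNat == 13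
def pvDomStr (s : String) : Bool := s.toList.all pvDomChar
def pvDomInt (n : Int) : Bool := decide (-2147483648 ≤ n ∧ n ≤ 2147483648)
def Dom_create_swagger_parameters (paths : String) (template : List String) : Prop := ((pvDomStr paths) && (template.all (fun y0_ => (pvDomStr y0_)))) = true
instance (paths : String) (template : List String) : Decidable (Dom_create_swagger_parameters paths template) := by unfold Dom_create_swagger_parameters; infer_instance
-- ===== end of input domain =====

-- ===== PORT A =====
-- B replaces A's split / contains / replace pipeline with a single character-level
-- automaton over the raw path (alternative decomposition, same cost); the Python
-- functions mutate `template` in place — the equivalence proved is about the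
-- returned list (both mutate it identically).
def pvBlock (name : String) : List String :=
  ["        - name: " ++ name, "          in: path", "          description: ",
   "          required: true", "          type: string"]

def pvStepA (st : List String × Bool) (sub : String) : List String × Bool :=
  if PySem.Str.isIn "{" sub then
    let p := PySem.Str.replace (PySem.Str.replace sub "{" "") "}" ""
    let st1 := if !st.2 then (st.1 ++ ["      parameters:"], true) else st
    (st1.1 ++ pvBlock p, st1.2)
  else st

def create_swagger_parameters (paths : String) (template : List String) : List String :=
  let splited_paths := (PySem.Str.split? paths "/").getD []  -- sep "/" ≠ "" so split? is always `some`; getD is a totality guard only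
  (splited_paths.foldl pvStepA (template, false)).1

-- ===== PORT B =====
-- the five lines Source B appends per collected name
def pvLines (name : String) : List String :=
  ["        - name: " ++ name, "          in: path", "          description: ",
   "          required: true", "          type: string"]

-- one step of Source B's per-character automaton: state = (names, cur, seen)
def pvScanStep (st : List String × List Char × Bool) (ch : Char) : List String × List Char × Bool :=
  if ch = '/' then
    ((if st.2.2 then st.1 ++ [String.ofList st.2.1] else st.1), [], false)
  else if ch = '{' then (st.1, st.2.1, true)
  else if ch = '}' then st
  else (st.1, st.2.1 ++ [ch], st.2.2)

def create_swagger_parameters_alt (paths : String) (template : List String) : List String :=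
  let st := paths.toList.foldl pvScanStep ([], [], false)
  let names := if st.2.2 then st.1 ++ [String.ofList st.2.1] else st.1
  if names = [] then template
  else (template ++ ["      parameters:"]) ++ names.flatMap pvLines

-- ===== PRECONDITION & SPEC =====
def Spec_create_swagger_parameters (paths : String) (template : List String) (out : List String) : Prop := out = create_swagger_parameters_alt paths template
instance (paths : String) (template : List String) (out : List String) : Decidable (Spec_create_swagger_parameters paths template out) := by unfold Spec_create_swagger_parameters; infer_instance

-- ===== CLAIM (what is proved, stated in full; the proofs are below) =====
def Claim_equal_create_swagger_parameters : Prop := ∀ (paths : String) (template : List String), Dom_create_swagger_parameters paths template → Spec_create_swagger_parameters paths template (create_swagger_parameters paths template)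

-- ===== LEMMAS AND PROOFS =====

-- simple structural recursion equal to Python's s.split("/")
def splitSlash : List Char → List (List Char)
  | [] => [[]]
  | c :: r =>
    if c = '/' then [] :: splitSlash r
    else match splitSlash r with
      | [] => [[c]]
      | s0 :: rest => (c :: s0) :: rest

lemma splitSlash_ne_nil (l : List Char) : splitSlash l ≠ [] := by
  cases l with
  | nil => simp [splitSlash]
  | cons c r =>
    simp only [splitSlash]
    split_ifs
    · simp
    · cases splitSlash r <;> simp

def pvModHead (p : List Char) : List (List Char) → List (List Char)
  | [] => [p]
  | s0 :: rest => (p ++ s0) :: rest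

lemma go_cons (n : Nat) (c : Char) (t cur : List Char) (acc : List (List Char)) :
    PySem.Chars.splitOn.go ['/'] (n+1) (c::t) cur acc =
      (if List.isPrefixOf ['/'] (c::t) then PySem.Chars.splitOn.go ['/'] n t [] (cur.reverse :: acc)
       else PySem.Chars.splitOn.go ['/'] n t (c :: cur) acc) := by
  rw [PySem.Chars.splitOn.go.eq_def]
  simp [List.isPrefixOf]

lemma go_nil (n : Nat) (cur : List Char) (acc : List (List Char)) :
    PySem.Chars.splitOn.go ['/'] (n+1) [] cur acc = (cur.reverse :: acc).reverse := by
  rw [PySem.Chars.splitOn.go.eq_def]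

lemma splitOn_go_spec : ∀ (fuel : Nat) (l cur : List Char) (acc : List (List Char)), l.length < fuel →
    PySem.Chars.splitOn.go ['/'] fuel l cur acc
      = acc.reverse ++ pvModHead cur.reverse (splitSlash l) := by
  intro fuel
  induction fuel with
  | zero => intro l cur acc h; omega
  | succ n ih =>
    intro l cur acc h
    cases l with
    | nil =>
      rw [go_nil]
      simp [splitSlash, pvModHead]
    | cons c t =>
      rw [go_cons]
      have ht : t.length < n := by simpa using Nat.lt_of_succ_lt_succ h
      by_cases hc : c = '/'
      · subst hc
        rw [if_pos (by simp [List.isPrefixOf])]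
        rw [ih t [] (List.reverse cur :: acc) ht]
        have hne := splitSlash_ne_nil t
        cases hs : splitSlash t with
        | nil => exact absurd hs hne
        | cons s0 rest =>
          simp [splitSlash, pvModHead, hs]
      · rw [if_neg (by simp [List.isPrefixOf]; intro he; exact hc he.symm)]
        rw [ih t (c :: cur) acc ht]
        have hne := splitSlash_ne_nil t
        cases hs : splitSlash t with
        | nil => exact absurd hs hne
        | cons s0 rest =>
          simp [splitSlash, pvModHead, hs, hc]

lemma splitOn_eq_splitSlash (s : List Char) :
    PySem.Chars.splitOn s ['/'] = splitSlash s := by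
  unfold PySem.Chars.splitOn
  rw [splitOn_go_spec (s.length + 1) s [] [] (by omega)]
  have hne := splitSlash_ne_nil s
  cases hs : splitSlash s with
  | nil => exact absurd hs hne
  | cons s0 rest => simp [pvModHead]

lemma split_eq (paths : String) :
    (PySem.Str.split? paths "/").getD [] = (splitSlash paths.toList).map String.ofList := by
  simp [PySem.Str.split?, PySem.Chars.split?, splitOn_eq_splitSlash]

-- replace s [c] "" deletes every occurrence of c
lemma rgo_cons (c : Char) (n : Nat) (d : Char) (t acc : List Char) :
    PySem.Chars.replace.go [c] [] (n+1) (d::t) acc =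
      (if List.isPrefixOf [c] (d::t) then PySem.Chars.replace.go [c] [] n t acc
       else PySem.Chars.replace.go [c] [] n t (d :: acc)) := by
  rw [PySem.Chars.replace.go.eq_def]
  simp

lemma rgo_nil (c : Char) (n : Nat) (acc : List Char) :
    PySem.Chars.replace.go [c] [] (n+1) [] acc = acc.reverse := by
  rw [PySem.Chars.replace.go.eq_def]

lemma replace_go_spec (c : Char) : ∀ (fuel : Nat) (l acc : List Char), l.length ≤ fuel →
    PySem.Chars.replace.go [c] [] fuel l acc = acc.reverse ++ l.filter (· != c) := by
  intro fuel
  induction fuel with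
  | zero =>
    intro l acc h
    have : l = [] := List.length_eq_zero_iff.mp (Nat.le_zero.mp h)
    subst this
    rw [PySem.Chars.replace.go.eq_def]
    simp
  | succ n ih =>
    intro l acc h
    cases l with
    | nil => rw [rgo_nil]; simp
    | cons d t =>
      rw [rgo_cons]
      have ht : t.length ≤ n := by simpa using Nat.le_of_succ_le_succ h
      by_cases hd : c = d
      · subst hd
        rw [if_pos (by simp [List.isPrefixOf])]
        rw [ih t acc ht]
        simp
      · rw [if_neg (by simp [List.isPrefixOf]; intro he; exact hd he)]
        rw [ih t (d :: acc) ht]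
        have hbne : (d != c) = true := by simp [bne]; intro he; exact hd he.symm
        simp [hbne]

lemma replace_single (c : Char) (l : List Char) :
    PySem.Chars.replace l [c] [] = l.filter (· != c) := by
  unfold PySem.Chars.replace
  rw [if_neg (by simp)]
  exact replace_go_spec c l.length l [] le_rfl

lemma singleton_infix_iff (c : Char) (l : List Char) : [c] <:+: l ↔ c ∈ l := by
  constructor
  · intro h; exact List.singleton_sublist.mp h.sublist
  · intro h
    obtain ⟨s, t, rfl⟩ := List.append_of_mem h
    exact ⟨s, t, by simp⟩

lemma isIn_singleton (c : Char) (l : List Char) :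
    PySem.Chars.isIn [c] l = l.contains c := by
  by_cases h : c ∈ l
  · have h1 : PySem.Chars.isIn [c] l = true :=
      (PySem.Chars.isIn_iff_infix _ _).mpr ((singleton_infix_iff c l).mpr h)
    simp [h1, h]
  · have h1 : PySem.Chars.isIn [c] l = false := by
      rw [PySem.Chars.isIn_eq_false_iff]
      exact fun hin => h ((singleton_infix_iff c l).mp hin)
    simp [h1, h]

-- the names A extracts from a segment list
def pvNames (segs : List String) : List String :=
  segs.filterMap (fun seg =>
    if PySem.Str.isIn "{" seg then
      some (PySem.Str.replace (PySem.Str.replace seg "{" "") "}" "")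
    else none)

def stripB (s : List Char) : List Char := s.filter (fun c => !(c == '{' || c == '}'))

def namesC (segs : List (List Char)) : List String :=
  segs.filterMap (fun s =>
    if s.contains '{' then some (String.ofList (stripB s)) else none)

lemma strip_eq (s : List Char) :
    PySem.Chars.replace (PySem.Chars.replace s ['{'] []) ['}'] [] = stripB s := by
  rw [replace_single, replace_single, List.filter_filter, stripB]
  congr 1
  funext c
  simp only [bne, Bool.not_or]
  exact Bool.and_comm _ _

lemma pvNames_map (segs : List (List Char)) :
    pvNames (segs.map String.ofList) = namesC segs := by
  induction segs with
  | nil => rfl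
  | cons s rest ih =>
    have hiso : PySem.Str.isIn "{" (String.ofList s) = PySem.Chars.isIn ['{'] s := by
      simp [PySem.Str.isIn]
    have hrep : PySem.Str.replace (PySem.Str.replace (String.ofList s) "{" "") "}" ""
        = String.ofList (stripB s) := by
      apply String.toList_inj.mp
      simp [PySem.Str.toList_replace, strip_eq]
    by_cases hm : '{' ∈ s
    · simp [pvNames, namesC, hiso, isIn_singleton, hm, hrep, ih, pvNames] at ih ⊢
      exact ih
    · simp [pvNames, namesC, hiso, isIn_singleton, hm, ih, pvNames] at ih ⊢
      exact ih

-- A's loop, characterised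
lemma loopA_true (l : List String) (t : List String) :
    (l.foldl pvStepA (t, true)).1 = t ++ (pvNames l).flatMap pvBlock := by
  induction l generalizing t with
  | nil => simp [pvNames]
  | cons x xs ih =>
      by_cases h : PySem.Chars.isIn ['{'] x.toList = true <;>
        simp [pvStepA, pvNames, h, ih, List.append_assoc]

lemma loopA_false (l : List String) (t : List String) :
    (l.foldl pvStepA (t, false)).1 =
      if pvNames l = [] then t
      else t ++ ["      parameters:"] ++ (pvNames l).flatMap pvBlock := by
  induction l generalizing t with
  | nil => simp [pvNames]
  | cons x xs ih =>
      by_cases h : PySem.Chars.isIn ['{'] x.toList = true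
      · simp [pvStepA, pvNames, h, loopA_true, List.append_assoc]
      · simp [pvStepA, pvNames, h, ih]

-- B's scan, characterised
def pvFinish (st : List String × List Char × Bool) : List String :=
  if st.2.2 then st.1 ++ [String.ofList st.2.1] else st.1

def headNames (cur : List Char) (seen : Bool) : List (List Char) → List String
  | [] => []
  | s0 :: rest =>
    (if seen || s0.contains '{' then [String.ofList (cur ++ stripB s0)] else []) ++ namesC rest

lemma headNames_nil_false (segs : List (List Char)) :
    headNames [] false segs = namesC segs := by
  cases segs with
  | nil => rfl
  | cons s0 rest =>
    by_cases hm : '{' ∈ s0 <;> simp [headNames, namesC, hm]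

lemma scan_spec : ∀ (l : List Char) (ns : List String) (cur : List Char) (seen : Bool),
    pvFinish (l.foldl pvScanStep (ns, cur, seen)) = ns ++ headNames cur seen (splitSlash l) := by
  intro l
  induction l with
  | nil =>
    intro ns cur seen
    cases seen <;> simp [pvFinish, splitSlash, headNames, stripB, namesC]
  | cons c r ih =>
    intro ns cur seen
    by_cases hs : c = '/'
    · subst hs
      simp only [List.foldl_cons, pvScanStep, if_true]
      rw [ih, headNames_nil_false]
      cases seen <;> simp [splitSlash, headNames, stripB, namesC, List.append_assoc]
    · have hne := splitSlash_ne_nil r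
      obtain ⟨s0, rest, hsp⟩ : ∃ s0 rest, splitSlash r = s0 :: rest := by
        cases h : splitSlash r with
        | nil => exact absurd h hne
        | cons a b => exact ⟨a, b, rfl⟩
      by_cases hb : c = '{'
      · subst hb
        simp only [List.foldl_cons, pvScanStep, if_neg (by decide : ¬('{' = '/')), if_true]
        rw [ih]
        simp [splitSlash, hsp, headNames, stripB]
      · by_cases hb2 : c = '}'
        · subst hb2
          simp only [List.foldl_cons, pvScanStep, if_neg (by decide : ¬('}' = '/')),
            if_neg (by decide : ¬('}' = '{')), if_true]
          rw [ih]
          cases hcont : s0.contains '{' <;>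
            simp [splitSlash, hsp, headNames, stripB, hcont]
        · simp only [List.foldl_cons, pvScanStep, if_neg hs, if_neg hb, if_neg hb2]
          rw [ih]
          have hstrip : stripB (c :: s0) = c :: stripB s0 := by
            simp [stripB, hb, hb2]
          have hb' : ¬ ('{' = c) := fun h => hb h.symm
          simp [splitSlash, hs, hsp, headNames, hstrip, hb', List.append_assoc]

-- ===== VERDICT (by name: the statement is the Claim_ definition above) =====
theorem create_swagger_parameters_spec : Claim_equal_create_swagger_parameters := by
  intro paths template _
  unfold Spec_create_swagger_parameters create_swagger_parameters create_swagger_parameters_alt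
  rw [split_eq]
  rw [loopA_false, pvNames_map]
  have hBl : pvLines = pvBlock := rfl
  have hB := scan_spec paths.toList [] [] false
  rw [headNames_nil_false] at hB
  simp only [List.nil_append] at hB
  simp only [pvFinish] at hB
  simp only [hB, hBl, List.append_assoc]
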